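-- pv_equiv track=rewrite | github.com/MrBrantCode/unitest_baseline | mut_generate/mist_train_taco/taco_14135/solution.py | find_smallest_repeated_number
-- ===== SOURCE A (Python) =====
-- def find_smallest_repeated_number(arr, N, K):
--     # Create a dictionary to count occurrences of each number
--     count_dict = {}
--
--     # Count the occurrences of each number in the array
--     for num in arr:
--         if num in count_dict:
--             count_dict[num] += 1
--         else:
--             count_dict[num] = 1
--
--     # Find the smallest number that is repeated exactly K times
--     smallest_repeated_number = float('inf')
--     found = False
--
--     for num, count in count_dict.items():
--         if count == K and num < smallest_repeated_number:
--             smallest_repeated_number = num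
--             found = True
--
--     # If no such number is found, return -1
--     if not found:
--         return -1
--
--     return smallest_repeated_number
-- ===== SOURCE B (Python) =====
-- def find_smallest_repeated_number(arr, N, K):
--     s = sorted(arr)
--     i, n = 0, len(s)
--     while i < n:
--         j = i + 1
--         while j < n and s[j] == s[i]:
--             j += 1
--         if j - i == K:
--             return s[i]
--         i = j
--     return -1
-- ===== Notes on version B (the rewrite author's own statement) =====
-- stated objective: alternative
-- what changed: Replaces the dict-count pass plus min-scan over dict items by sorting the array once and walking it in one pass over runs of equal values, returning the first run of length exactly K (ascending order makes it the smallest).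
import Mathlib
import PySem

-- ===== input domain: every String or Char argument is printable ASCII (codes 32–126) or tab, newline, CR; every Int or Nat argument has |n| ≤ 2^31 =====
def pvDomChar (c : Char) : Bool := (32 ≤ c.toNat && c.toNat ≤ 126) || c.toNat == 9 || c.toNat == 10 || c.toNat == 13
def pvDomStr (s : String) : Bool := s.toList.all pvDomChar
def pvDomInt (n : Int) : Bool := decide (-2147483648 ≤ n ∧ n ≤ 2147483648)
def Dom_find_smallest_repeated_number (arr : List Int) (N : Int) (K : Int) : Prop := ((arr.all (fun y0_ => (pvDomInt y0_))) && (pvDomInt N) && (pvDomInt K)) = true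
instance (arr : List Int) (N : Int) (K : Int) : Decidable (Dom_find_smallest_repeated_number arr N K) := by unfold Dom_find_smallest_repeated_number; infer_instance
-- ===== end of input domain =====

-- B replaces A's dict-count pass plus min-scan over the dict items by sorting the
-- array once and scanning runs of equal values in a single pass (alternative algorithm).

-- ===== PORT A =====
-- A: count occurrences in a dict, then scan the items for the smallest key with count K.
-- 'smallest_repeated_number = float("inf")' is encoded by the found = false state:
-- while found is false, any comparison 'num < smallest_repeated_number' is true,
-- exactly as num < float("inf") is in Python; the 0 in the initial state is never read.
def find_smallest_repeated_number (arr : List Int) (N : Int) (K : Int) : Int :=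
  let count_dict := arr.foldl
    (fun d num => if d.contains num then d.insert num (d.getD num 0 + 1) else d.insert num 1)
    PySem.Dict.empty
  let r := count_dict.items.foldl
    (fun (st : Int × Bool) (p : Int × Int) =>
      if p.2 = K ∧ (st.2 = false ∨ p.1 < st.1) then (p.1, true) else st)
    (0, false)
  if r.2 = false then -1 else r.1

-- ===== PORT B =====
-- inner while loop of Source B: j starts at i + 1 and advances over values equal to s[i];
-- pvRun returns (j - (i + 1), rest of the list from j)
def pvRun (v : Int) : List Int → Nat × List Int
  | [] => (0, [])
  | x :: t => if x = v then ((pvRun v t).1 + 1, (pvRun v t).2) else (0, x :: t)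

-- needed for termination of pvScan
theorem pvRun_length_le (v : Int) : ∀ t : List Int, (pvRun v t).2.length ≤ t.length := by
  intro t
  induction t with
  | nil => simp [pvRun]
  | cons x t ih => by_cases h : x = v <;> simp [pvRun, h] <;> omega

-- outer while loop of Source B: take the run at the front, return its value if its length is K
def pvScan (K : Int) : List Int → Int
  | [] => -1
  | v :: t =>
    if ((pvRun v t).1 : Int) + 1 = K then v else pvScan K (pvRun v t).2
termination_by l => l.length
decreasing_by
  simp only [List.length_cons]
  have := pvRun_length_le v t
  omega

def find_smallest_repeated_number_alt (arr : List Int) (N : Int) (K : Int) : Int :=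
  pvScan K (PySem.List.sorted arr (fun x => x) false)

-- ===== PRECONDITION & SPEC =====
def Spec_find_smallest_repeated_number (arr : List Int) (N : Int) (K : Int) (out : Int) : Prop := out = find_smallest_repeated_number_alt arr N K
instance (arr : List Int) (N : Int) (K : Int) (out : Int) : Decidable (Spec_find_smallest_repeated_number arr N K out) := by unfold Spec_find_smallest_repeated_number; infer_instance

-- ===== CLAIM (what is proved, stated in full; the proofs are below) =====
def Claim_equal_find_smallest_repeated_number : Prop := ∀ (arr : List Int) (N : Int) (K : Int), Dom_find_smallest_repeated_number arr N K → Spec_find_smallest_repeated_number arr N K (find_smallest_repeated_number arr N K)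

-- ===== LEMMAS AND PROOFS =====


theorem pvCount_eq_counter (arr : List Int) :
    arr.foldl
      (fun d num => if d.contains num then d.insert num (d.getD num 0 + 1) else d.insert num 1)
      PySem.Dict.empty = PySem.Dict.counter arr := by
  rw [← PySem.Dict.foldl_insert_getD_add_one_eq_counter]
  congr 1
  funext d num
  by_cases hc : d.contains num
  · simp [hc]
  · simp only [hc, Bool.false_eq_true, if_false]
    rw [PySem.Dict.getD_of_not_contains d 0 (by simpa using hc)]
    norm_num

theorem pvFoldTrue (K : Int) (l : List (Int × Int)) (b : Int) :
    l.foldl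
      (fun (st : Int × Bool) (p : Int × Int) =>
        if p.2 = K ∧ (st.2 = false ∨ p.1 < st.1) then (p.1, true) else st) (b, true)
    = (((l.filter (fun p => decide (p.2 = K))).map Prod.fst).foldl min b, true) := by
  induction l generalizing b with
  | nil => simp
  | cons p l ih =>
    simp only [List.foldl_cons, List.filter_cons]
    by_cases hK : p.2 = K
    · simp only [hK, decide_true, if_true, List.map_cons, List.foldl_cons]
      by_cases hlt : p.1 < b
      · rw [if_pos (show True ∧ (true = false ∨ p.1 < b) from ⟨trivial, Or.inr hlt⟩), ih,
          min_eq_right (le_of_lt hlt)]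
      · rw [if_neg (by simp [hlt]), ih, min_eq_left (by omega)]
    · rw [if_neg (by simp [hK]), ih]
      simp [hK]

theorem pvFoldFalse (K : Int) (l : List (Int × Int)) :
    l.foldl
      (fun (st : Int × Bool) (p : Int × Int) =>
        if p.2 = K ∧ (st.2 = false ∨ p.1 < st.1) then (p.1, true) else st) (0, false)
    = match l.filter (fun p => decide (p.2 = K)) with
      | [] => (0, false)
      | q :: rest => ((rest.map Prod.fst).foldl min q.1, true) := by
  induction l with
  | nil => simp
  | cons p l ih =>
    simp only [List.foldl_cons, List.filter_cons]
    by_cases hK : p.2 = K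
    · rw [if_pos (show p.2 = K ∧ (True ∨ p.1 < 0) from ⟨hK, Or.inl trivial⟩)]
      simp only [hK, decide_true, if_true]
      exact pvFoldTrue K l p.1
    · rw [if_neg (by simp [hK]), ih]
      simp [hK]

theorem pvMin?_congr (l₁ l₂ : List Int) (h : ∀ x, x ∈ l₁ ↔ x ∈ l₂) : l₁.min? = l₂.min? := by
  cases h1 : l₁.min? with
  | none =>
    rw [List.min?_eq_none_iff] at h1
    subst h1
    symm
    rw [List.min?_eq_none_iff, List.eq_nil_iff_forall_not_mem]
    intro x hx
    simpa using (h x).mpr hx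
  | some m =>
    rw [List.min?_eq_some_iff] at h1
    symm
    rw [List.min?_eq_some_iff]
    exact ⟨(h m).mp h1.1, fun b hb => h1.2 b ((h b).mpr hb)⟩

theorem pvA_eq_min (arr : List Int) (N K : Int) :
    find_smallest_repeated_number arr N K
    = match ((PySem.Set.ofList arr).filter (fun v => decide ((arr.count v : Int) = K))).min? with
      | none => -1
      | some m => m := by
  simp only [find_smallest_repeated_number, pvCount_eq_counter, PySem.Dict.items_counter,
    pvFoldFalse, List.filter_map]
  rcases hQ : (PySem.Set.ofList arr).filter (fun v => decide ((arr.count v : Int) = K)) with _ | ⟨x, xs⟩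
  · simp only [show ((PySem.Set.ofList arr).filter
        ((fun p => decide (p.2 = K)) ∘ fun k => (k, (List.count k arr : Int)))) = [] from by
      simpa [Function.comp, List.count] using hQ]
    simp [List.min?]
  · simp only [show ((PySem.Set.ofList arr).filter
        ((fun p => decide (p.2 = K)) ∘ fun k => (k, (List.count k arr : Int)))) = x :: xs from by
      simpa [Function.comp, List.count] using hQ]
    simp [List.min?, List.map_map, Function.comp_def]

theorem pvRun_spec (v : Int) (t : List Int) :
    t = List.replicate (pvRun v t).1 v ++ (pvRun v t).2
    ∧ ∀ x, (pvRun v t).2.head? = some x → x ≠ v := by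
  induction t with
  | nil => simp [pvRun]
  | cons x t ih =>
    by_cases h : x = v
    · refine ⟨?_, ?_⟩
      · simp only [pvRun, h, if_pos rfl, List.replicate_succ, List.cons_append]
        exact congrArg (v :: ·) ih.1
      · intro y hy
        apply ih.2
        simpa [pvRun, h] using hy
    · constructor
      · simp [pvRun, h]
      · intro y hy
        simp [pvRun, h] at hy
        omega

theorem pvRun_gt (v : Int) (t : List Int) (hs : (v :: t).Pairwise (· ≤ ·)) :
    ∀ w ∈ (pvRun v t).2, v < w := by
  obtain ⟨hdec, hhead⟩ := pvRun_spec v t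
  have ht : t.Pairwise (· ≤ ·) := hs.of_cons
  have hvt : ∀ b ∈ t, v ≤ b := fun b hb => List.rel_of_pairwise_cons hs hb
  have hrsub : (pvRun v t).2.Sublist t := by
    conv_rhs => rw [hdec]
    exact List.sublist_append_right _ _
  have hrp : (pvRun v t).2.Pairwise (· ≤ ·) := List.Pairwise.sublist hrsub ht
  cases hre : (pvRun v t).2 with
  | nil => simp
  | cons x r' =>
    intro w hw
    have hxv : x ≠ v := hhead x (by simp [hre])
    have hvx : v ≤ x := hvt x (by rw [hdec, hre]; exact List.mem_append_right _ (by simp))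
    rw [hre] at hrp
    rcases List.mem_cons.mp hw with rfl | hw'
    · omega
    · have hxw : x ≤ w := List.rel_of_pairwise_cons hrp hw'
      omega

theorem pvRun_counts (v : Int) (t : List Int) (hs : (v :: t).Pairwise (· ≤ ·)) :
    (v :: t).count v = (pvRun v t).1 + 1
    ∧ ∀ w ∈ (pvRun v t).2, (v :: t).count w = (pvRun v t).2.count w := by
  obtain ⟨hdec, _⟩ := pvRun_spec v t
  have hrgt := pvRun_gt v t hs
  have hvnr : v ∉ (pvRun v t).2 := fun h => absurd (hrgt v h) (lt_irrefl v)
  constructor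
  · conv_lhs => rw [hdec]
    simp [List.count_cons, List.count_append, List.count_replicate,
      List.count_eq_zero.mpr hvnr]
  · intro w hw
    have hwv : w ≠ v := by have := hrgt w hw; omega
    conv_lhs => rw [hdec]
    simp [List.count_cons, List.count_append, List.count_replicate, hwv, Ne.symm hwv]

theorem pvScan_eq_min (K : Int) (s : List Int) (hs : s.Pairwise (· ≤ ·)) :
    pvScan K s
    = match (s.filter (fun v => decide ((s.count v : Int) = K))).min? with
      | none => -1
      | some m => m := by
  revert hs
  induction s using pvScan.induct (K := K) with
  | case1 =>
    intro _
    simp [pvScan]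
  | case2 v t hcond =>
    intro hs
    have hcountv := (pvRun_counts v t hs).1
    have hQ : ((v :: t).filter (fun w => decide (((v :: t).count w : Int) = K))).min?
        = some v := by
      rw [List.min?_eq_some_iff]
      constructor
      · rw [List.mem_filter]
        refine ⟨List.mem_cons_self, ?_⟩
        rw [hcountv]
        simpa using hcond
      · intro b hb
        have hbmem := (List.mem_filter.mp hb).1
        rcases List.mem_cons.mp hbmem with rfl | hbt
        · exact le_refl _
        · exact List.rel_of_pairwise_cons hs hbt
    rw [hQ]
    simp [pvScan, hcond]
  | case3 v t hcond ih =>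
    intro hs
    obtain ⟨hdec, _⟩ := pvRun_spec v t
    have ht : t.Pairwise (· ≤ ·) := hs.of_cons
    have hrsub : (pvRun v t).2.Sublist t := by
      conv_rhs => rw [hdec]
      exact List.sublist_append_right _ _
    have hrp : (pvRun v t).2.Pairwise (· ≤ ·) := List.Pairwise.sublist hrsub ht
    obtain ⟨hcountv, hcountw⟩ := pvRun_counts v t hs
    have hpsv : (fun w => decide (((v :: t).count w : Int) = K)) v = false := by
      show decide (((v :: t).count v : Int) = K) = false
      rw [hcountv]
      simpa using hcond
    have key : ∀ p : Int → Bool, p v = false → (v :: t).filter p = (pvRun v t).2.filter p := by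
      intro p hpv
      conv_lhs => rw [hdec]
      simp [List.filter_cons, List.filter_append, List.filter_replicate, hpv]
    have hfil : (v :: t).filter (fun w => decide (((v :: t).count w : Int) = K))
        = (pvRun v t).2.filter (fun w => decide (((pvRun v t).2.count w : Int) = K)) := by
      rw [key _ hpsv, List.filter_congr (fun w hw => by rw [hcountw w hw])]
    simp only [pvScan, if_neg hcond]
    rw [ih hrp, hfil]

-- ===== VERDICT (by name: the statement is the Claim_ definition above) =====
theorem find_smallest_repeated_number_spec : Claim_equal_find_smallest_repeated_number := by
  intro arr N K _
  unfold Spec_find_smallest_repeated_number find_smallest_repeated_number_alt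
  have hperm := PySem.List.sorted_perm arr (fun x => x) false
  have hpair : (PySem.List.sorted arr (fun x => x) false).Pairwise (· ≤ ·) :=
    PySem.List.sorted_pairwise arr (fun x => x)
  rw [pvA_eq_min, pvScan_eq_min K _ hpair]
  have hcnt : ∀ v : Int, (PySem.List.sorted arr (fun x => x) false).count v = arr.count v :=
    fun v => hperm.count_eq v
  have hmm : ((PySem.List.sorted arr (fun x => x) false).filter
        (fun v => decide (((PySem.List.sorted arr (fun x => x) false).count v : Int) = K))).min?
      = ((PySem.Set.ofList arr).filter (fun v => decide ((arr.count v : Int) = K))).min? := by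
    apply pvMin?_congr
    intro x
    simp only [List.mem_filter, PySem.Set.mem_ofList, hperm.mem_iff, hcnt]
  rw [hmm]
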